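-- pv_equiv track=rewrite | github.com/AiZhanghan/Leetcode | 秋招/360/2/2.py | func
-- ===== SOURCE A (Python) =====
-- import heapq
--
-- def func(matrix, n):
--     """
--     Args:
--         matrix: list[list[int]]
--         n: int
--
--     Return:
--         int
--     """
--     for i in range(len(matrix)):
--         for j in range(1, len(matrix[0])):
--             matrix[i][j] -= matrix[i][j - 1]
--
--     pq = [(-matrix[i][0], i, 0) for i in range(len(matrix))]
--     heapq.heapify(pq)
--     res = 0
--     for _ in range(n):
--         val, x, y = heapq.heappop(pq)
--         res -= val
--         if y < len(matrix[0]) - 1: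
--             heapq.heappush(pq, (-matrix[x][y + 1], x, y + 1))
--     return res
-- ===== SOURCE B (Python) =====
-- def func(matrix, n):
--     # Same in-place differencing as the original (mutation preserved).
--     for i in range(len(matrix)):
--         for j in range(1, len(matrix[0])):
--             matrix[i][j] -= matrix[i][j - 1]
--
--     cols = len(matrix[0]) if matrix else 0
--     ptr = [0] * len(matrix)       # next unconsumed column of each row
--     res = 0
--     for _ in range(n):
--         best = None
--         for i in range(len(matrix)):
--             if ptr[i] < cols and (best is None or matrix[i][ptr[i]] > matrix[best][ptr[best]]):
--                 best = i
--         if best is None: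
--             raise IndexError("index out of range")
--         res += matrix[best][ptr[best]]
--         ptr[best] += 1
--     return res
-- ===== Notes on version B (the rewrite author's own statement) =====
-- stated objective: alternative
-- what changed: Replaces the heap (heapify/heappop/heappush of (-value,row,col) triples) with an explicit per-row frontier pointer array: each of the n rounds linearly scans all rows for the largest current frontier value (first row wins ties) and advances that row's pointer.
import Mathlib
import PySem

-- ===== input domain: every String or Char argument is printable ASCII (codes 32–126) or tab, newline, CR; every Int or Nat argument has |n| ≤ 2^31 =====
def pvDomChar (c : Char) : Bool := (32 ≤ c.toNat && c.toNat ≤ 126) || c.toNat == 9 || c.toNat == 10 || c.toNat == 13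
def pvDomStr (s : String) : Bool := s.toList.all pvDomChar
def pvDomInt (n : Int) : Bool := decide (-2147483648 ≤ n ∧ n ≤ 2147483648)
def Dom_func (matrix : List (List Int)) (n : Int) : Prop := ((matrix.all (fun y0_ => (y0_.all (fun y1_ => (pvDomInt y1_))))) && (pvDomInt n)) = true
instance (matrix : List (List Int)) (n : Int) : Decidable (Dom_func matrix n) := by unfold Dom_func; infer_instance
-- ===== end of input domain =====

-- B replaces A's heap of (-value, row, col) triples by an explicit frontier-pointer array
-- scanned linearly each round (alternative decomposition; O(n*r) selection instead of O(n log r)); both versions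
-- mutate `matrix` in place identically in Python — the equivalence proved here is about
-- the return value.

-- ===== PORT A =====
-- shared between the two ports: the in-place differencing double loop, textually identical
-- in both Python versions ('for j in range(1, len(matrix[0])): row[j] -= row[j-1]')
def pvDiffRow (cols : Nat) (row : List Int) : List Int :=
  (List.range' 1 (cols - 1)).foldl (fun r j => r.set j (r.getD j 0 - r.getD (j - 1) 0)) row

-- matrix[x][y] for the in-range nonnegative indices used under Pre_ (Python raises otherwise)
def pvGet (M : List (List Int)) (x y : Int) : Int := (M.getD x.toNat []).getD y.toNat 0

-- Python's tuple comparison on (Int, Int, Int), lexicographic strict <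
def pvLess (a b : Int × Int × Int) : Bool :=
  decide (a.1 < b.1) || (decide (a.1 = b.1) &&
    (decide (a.2.1 < b.2.1) || (decide (a.2.1 = b.2.1) && decide (a.2.2 < b.2.2))))

def pvMin2 (a b : Int × Int × Int) : Int × Int × Int := if pvLess b a then b else a

-- heapq model: a bag of distinct triples; heappop returns (and removes) the smallest
-- triple — exactly heapq's observable behaviour; heappush appends.
def pvHeapPop? : List (Int × Int × Int) → Option ((Int × Int × Int) × List (Int × Int × Int))
  | [] => none
  | a :: rest =>
    let m := rest.foldl pvMin2 a
    some (m, (a :: rest).erase m)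

def funcLoopA (M : List (List Int)) (cols : Int) :
    Nat → List (Int × Int × Int) → Int → Int
  | 0, _, res => res
  | k + 1, pq, res =>
    match pvHeapPop? pq with
    | none => res           -- Python: heappop raises IndexError (outside Pre_func)
    | some ((val, x, y), pq') =>
      let res' := res - val
      let pq'' := if y < cols - 1 then pq' ++ [(-(pvGet M x (y + 1)), x, y + 1)] else pq'
      funcLoopA M cols k pq'' res'

def func (matrix : List (List Int)) (n : Int) : Int :=
  let cols := (matrix.headD []).length
  let M := matrix.map (pvDiffRow cols)
  let pq := (List.range M.length).map (fun i => (-(pvGet M i 0), (i : Int), (0 : Int)))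
  funcLoopA M (cols : Int) n.toNat pq 0

-- ===== PORT B =====
-- one step of the linear scan 'for i in range(len(matrix)): if ptr[i] < cols and (...)'
def pvBestStep (M : List (List Int)) (ptr : List Int) (cols : Int)
    (best : Option Nat) (i : Nat) : Option Nat :=
  if ptr.getD i 0 < cols then
    match best with
    | none => some i
    | some b =>
      if pvGet M b (ptr.getD b 0) < pvGet M i (ptr.getD i 0) then some i else some b
  else best

def pvBest (M : List (List Int)) (ptr : List Int) (cols : Int) : Option Nat :=
  (List.range M.length).foldl (pvBestStep M ptr cols) none

def funcLoopB (M : List (List Int)) (cols : Int) : Nat → List Int → Int → Int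
  | 0, _, res => res
  | k + 1, ptr, res =>
    match pvBest M ptr cols with
    | none => res           -- Python: raise IndexError (outside Pre_func)
    | some b =>
      let y := ptr.getD b 0
      funcLoopB M cols k (ptr.set b (y + 1)) (res + pvGet M b y)

def func_alt (matrix : List (List Int)) (n : Int) : Int :=
  let M := matrix.map (pvDiffRow (matrix.headD []).length)
  let cols : Int := if matrix.isEmpty then 0 else ((matrix.headD []).length : Int)
  funcLoopB M cols n.toNat (List.replicate matrix.length 0) 0

-- ===== PRECONDITION & SPEC =====
-- Pre_func holds exactly where the Python A returns: on a nonempty matrix every row must be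
-- indexable up to len(matrix[0])-1 and nonempty, and there must be enough entries for n pops.
def Pre_func (matrix : List (List Int)) (n : Int) : Prop :=
  if matrix.isEmpty then n ≤ 0
  else
    1 ≤ (matrix.headD []).length ∧
    (∀ row ∈ matrix, (matrix.headD []).length ≤ row.length) ∧
    n ≤ (matrix.length : Int) * ((matrix.headD []).length : Int)
instance (matrix : List (List Int)) (n : Int) : Decidable (Pre_func matrix n) := by
  unfold Pre_func; infer_instance

def pvWitness_func : List (List Int) × Int := ([[1, 5], [2, 4]], 3)

def Spec_func (matrix : List (List Int)) (n : Int) (out : Int) : Prop := out = func_alt matrix n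
instance (matrix : List (List Int)) (n : Int) (out : Int) : Decidable (Spec_func matrix n out) := by
  unfold Spec_func; infer_instance

-- ===== CLAIM (what is proved, stated in full; the proofs are below) =====
def Claim_equal_func : Prop := ∀ (matrix : List (List Int)) (n : Int),
  Dom_func matrix n → Pre_func matrix n → Spec_func matrix n (func matrix n)

-- ===== LEMMAS AND PROOFS =====

-- the frontier element of row i under pointer state ptr
def pvElem (M : List (List Int)) (ptr : List Int) (i : Nat) : Int × Int × Int :=
  (-(pvGet M i (ptr.getD i 0)), (i : Int), ptr.getD i 0)

def pvFront (M : List (List Int)) (cols : Int) (ptr : List Int) : List (Int × Int × Int) :=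
  (List.range M.length).filterMap
    (fun i => if ptr.getD i 0 < cols then some (pvElem M ptr i) else none)

-- option-valued accumulator computing the pvMin2-minimum of a list
def pvOStep (acc : Option (Int × Int × Int)) (e : Int × Int × Int) : Option (Int × Int × Int) :=
  some (match acc with | none => e | some m => pvMin2 m e)

def pvOMin (l : List (Int × Int × Int)) : Option (Int × Int × Int) := l.foldl pvOStep none

theorem pvMin2_lcomm (a b m : Int × Int × Int) :
    pvMin2 b (pvMin2 a m) = pvMin2 a (pvMin2 b m) := by
  obtain ⟨m1, m2, m3⟩ := m; obtain ⟨a1, a2, a3⟩ := a; obtain ⟨b1, b2, b3⟩ := b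
  simp only [pvMin2, pvLess, Bool.or_eq_true, Bool.and_eq_true, decide_eq_true_eq]
  split_ifs <;> simp_all [Prod.mk.injEq] <;> omega

theorem pvMin2_comm (a b : Int × Int × Int) : pvMin2 a b = pvMin2 b a := by
  obtain ⟨a1, a2, a3⟩ := a; obtain ⟨b1, b2, b3⟩ := b
  simp only [pvMin2, pvLess, Bool.or_eq_true, Bool.and_eq_true, decide_eq_true_eq]
  split_ifs <;> simp_all [Prod.mk.injEq] <;> omega

theorem pvOStep_lcomm (acc : Option (Int × Int × Int)) (a b : Int × Int × Int) :
    pvOStep (pvOStep acc a) b = pvOStep (pvOStep acc b) a := by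
  cases acc <;> simp [pvOStep, pvMin2_lcomm, pvMin2_comm]

theorem foldl_pvOStep_perm {l₁ l₂ : List (Int × Int × Int)} (h : l₁.Perm l₂) :
    ∀ acc, l₁.foldl pvOStep acc = l₂.foldl pvOStep acc := by
  induction h with
  | nil => intro acc; rfl
  | cons x _ ih => intro acc; simp only [List.foldl_cons]; exact ih _
  | swap x y l => intro acc; simp only [List.foldl_cons]; rw [pvOStep_lcomm]
  | trans _ _ ih₁ ih₂ => intro acc; rw [ih₁, ih₂]

theorem pvOMin_perm {l₁ l₂ : List (Int × Int × Int)} (h : l₁.Perm l₂) : pvOMin l₁ = pvOMin l₂ :=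
  foldl_pvOStep_perm h none

theorem foldl_pvOStep_some (l : List (Int × Int × Int)) :
    ∀ m, l.foldl pvOStep (some m) = some (l.foldl pvMin2 m) := by
  induction l with
  | nil => intro m; rfl
  | cons a l ih => intro m; simp only [List.foldl_cons]; exact ih _

theorem pvOMin_cons (a : Int × Int × Int) (l : List (Int × Int × Int)) :
    pvOMin (a :: l) = some (l.foldl pvMin2 a) := by
  simp only [pvOMin, List.foldl_cons, pvOStep]
  exact foldl_pvOStep_some l a

-- every index selected by the scan fold satisfies P, given P on the candidates
theorem pvBestFold_prop (M : List (List Int)) (ptr : List Int) (cols : Int) (P : Nat → Prop) :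
    ∀ (l : List Nat) (ob : Option Nat),
      (∀ i ∈ l, ptr.getD i 0 < cols → P i) → (∀ b, ob = some b → P b) →
      ∀ b, l.foldl (pvBestStep M ptr cols) ob = some b → P b := by
  intro l
  induction l with
  | nil => intro ob _ hob b hb; exact hob b hb
  | cons i l ih =>
    intro ob hl hob b hb
    simp only [List.foldl_cons] at hb
    refine ih _ (fun j hj => hl j (List.mem_cons_of_mem _ hj)) ?_ b hb
    intro b' hb'
    simp only [pvBestStep] at hb'
    split_ifs at hb' with hc
    · cases hob' : ob with
      | none => simp [hob'] at hb'; exact hb' ▸ hl i (List.mem_cons_self) hc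
      | some b0 =>
        simp only [hob'] at hb'
        split_ifs at hb' <;> simp at hb'
        · exact hb' ▸ hl i (List.mem_cons_self) hc
        · exact hb' ▸ hob b0 hob'
    · exact hob b' hb'

-- the core correspondence: the option-minimum fold over the frontier elements of l mirrors
-- the argmax scan fold of B, provided l is increasing and past the accumulator's index
theorem pvCorr (M : List (List Int)) (ptr : List Int) (cols : Int) :
    ∀ (l : List Nat) (ob : Option Nat),
      List.Pairwise (· < ·) l →
      (∀ b, ob = some b → (ptr.getD b 0 < cols ∧ ∀ i ∈ l, b < i)) →
      (l.filterMap
          (fun i => if ptr.getD i 0 < cols then some (pvElem M ptr i) else none)).foldl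
          pvOStep (ob.map (pvElem M ptr)) =
        (l.foldl (pvBestStep M ptr cols) ob).map (pvElem M ptr) := by
  intro l
  induction l with
  | nil => intro ob _ _; rfl
  | cons i l ih =>
    intro ob hpw hob
    rcases List.pairwise_cons.mp hpw with ⟨hi, hpw'⟩
    by_cases hc : ptr.getD i 0 < cols
    · cases hob' : ob with
      | none =>
        simp only [List.filterMap_cons, if_pos hc, List.foldl_cons, Option.map_none,
          pvOStep, pvBestStep]
        exact ih (some i) hpw' (by rintro b ⟨rfl⟩; exact ⟨hc, hi⟩)
      | some b =>
        obtain ⟨hbc, hbl⟩ := hob b hob'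
        have hbi : b < i := hbl i List.mem_cons_self
        simp only [List.filterMap_cons, if_pos hc, List.foldl_cons, Option.map_some,
          pvOStep, pvBestStep]
        have hkey : pvMin2 (pvElem M ptr b) (pvElem M ptr i) =
            pvElem M ptr (if pvGet M b (ptr.getD b 0) < pvGet M i (ptr.getD i 0) then i else b) := by
          simp only [pvMin2, pvElem, pvLess, Bool.or_eq_true, Bool.and_eq_true,
            decide_eq_true_eq]
          split_ifs <;> first | rfl | (exfalso; omega)
        rw [hkey]
        split_ifs with hví
        · exact ih (some i) hpw' (by rintro b' ⟨rfl⟩; exact ⟨hc, hi⟩)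
        · exact ih (some b) hpw'
            (by rintro b' ⟨rfl⟩; exact ⟨hbc, fun j hj => lt_trans hbi (hi j hj)⟩)
    · have hstep : pvBestStep M ptr cols ob i = ob := by unfold pvBestStep; rw [if_neg hc]
      simp only [List.filterMap_cons, if_neg hc, List.foldl_cons, hstep]
      exact ih ob hpw'
        fun b hb => ⟨(hob b hb).1, fun j hj => (hob b hb).2 j (List.mem_cons_of_mem _ hj)⟩

theorem pvOMin_front (M : List (List Int)) (ptr : List Int) (cols : Int) :
    pvOMin (pvFront M cols ptr) = (pvBest M ptr cols).map (pvElem M ptr) := by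
  have h := pvCorr M ptr cols (List.range M.length) none List.pairwise_lt_range
    (by intro b hb; cases hb)
  simpa [pvFront, pvOMin, pvBest] using h

theorem pvGetD_set_ne (l : List Int) (b i : Nat) (x : Int) (h : b ≠ i) :
    (l.set b x).getD i 0 = l.getD i 0 := by
  rw [List.getD_eq_getElem?_getD, List.getD_eq_getElem?_getD, List.getElem?_set_ne h]

theorem pvElem_set_ne (M : List (List Int)) (ptr : List Int) (b i : Nat) (x : Int)
    (h : b ≠ i) : pvElem M (ptr.set b x) i = pvElem M ptr i := by
  unfold pvElem
  rw [pvGetD_set_ne _ _ _ _ h]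

theorem pvFront_split (M : List (List Int)) (cols : Int) (ptr : List Int) (b : Nat)
    (hb : b < M.length) (hbc : ptr.getD b 0 < cols) (hlen : ptr.length = M.length) :
    ∃ P S : List (Int × Int × Int),
      pvFront M cols ptr = P ++ pvElem M ptr b :: S ∧
      pvElem M ptr b ∉ P ∧
      (∀ x : Int,
        pvFront M cols (ptr.set b x) =
          P ++ (if x < cols then [(-(pvGet M b x), (b : Int), x)] else []) ++ S) := by
  have hrange : List.range M.length =
      List.range' 0 b ++ b :: List.range' (b + 1) (M.length - b - 1) := by
    rw [List.range_eq_range']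
    have h1 : List.range' 0 b ++ List.range' (0 + b) (M.length - b) =
        List.range' 0 (b + (M.length - b)) := List.range'_append_1
    have h2 : M.length - b = (M.length - b - 1) + 1 := by omega
    have h3 : b + (M.length - b) = M.length := by omega
    rw [h2, List.range'_succ] at h1
    have h4 : b + (M.length - b - 1 + 1) = M.length := by omega
    rw [h4] at h1
    simpa using h1.symm
  refine ⟨(List.range' 0 b).filterMap
      (fun i => if ptr.getD i 0 < cols then some (pvElem M ptr i) else none),
    (List.range' (b + 1) (M.length - b - 1)).filterMap
      (fun i => if ptr.getD i 0 < cols then some (pvElem M ptr i) else none), ?_, ?_, ?_⟩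
  · rw [pvFront, hrange, List.filterMap_append, List.filterMap_cons, if_pos hbc]
  · intro hmem
    rcases List.mem_filterMap.mp hmem with ⟨i, hi, hgi⟩
    have hib : i < b := by have := List.mem_range'_1.mp hi; omega
    split_ifs at hgi
    · have h2 : pvElem M ptr i = pvElem M ptr b := Option.some_inj.mp hgi
      have h3 := congrArg (fun e : Int × Int × Int => e.2.1) h2
      simp only [pvElem] at h3
      omega
  · intro x
    have hgb : (ptr.set b x).getD b 0 = x := by
      rw [List.getD_eq_getElem?_getD, List.getElem?_set_self (by omega)]; rfl
    have hP : (List.range' 0 b).filterMap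
        (fun i => if (ptr.set b x).getD i 0 < cols then some (pvElem M (ptr.set b x) i) else none) =
        (List.range' 0 b).filterMap
        (fun i => if ptr.getD i 0 < cols then some (pvElem M ptr i) else none) :=
      List.filterMap_congr (fun i hi => by
        have hib : b ≠ i := by have := List.mem_range'_1.mp hi; omega
        rw [pvGetD_set_ne _ _ _ _ hib, pvElem_set_ne _ _ _ _ _ hib])
    have hS : (List.range' (b + 1) (M.length - b - 1)).filterMap
        (fun i => if (ptr.set b x).getD i 0 < cols then some (pvElem M (ptr.set b x) i) else none) =
        (List.range' (b + 1) (M.length - b - 1)).filterMap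
        (fun i => if ptr.getD i 0 < cols then some (pvElem M ptr i) else none) :=
      List.filterMap_congr (fun i hi => by
        have hib : b ≠ i := by have := List.mem_range'_1.mp hi; omega
        rw [pvGetD_set_ne _ _ _ _ hib, pvElem_set_ne _ _ _ _ _ hib])
    have hel : pvElem M (ptr.set b x) b = (-(pvGet M b x), (b : Int), x) := by
      unfold pvElem
      rw [hgb]
    rw [pvFront, hrange, List.filterMap_append, List.filterMap_cons, hP, hS, hgb, hel]
    split_ifs with hx <;> simp

theorem pvLoop_eq (M : List (List Int)) (cols : Int) :
    ∀ (k : Nat) (ptr : List Int) (pq : List (Int × Int × Int)) (res : Int),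
      ptr.length = M.length → pq.Perm (pvFront M cols ptr) →
      funcLoopA M cols k pq res = funcLoopB M cols k ptr res := by
  intro k
  induction k with
  | zero => intro ptr pq res _ _; rfl
  | succ k ih =>
    intro ptr pq res hlen hperm
    cases hq : pq with
    | nil =>
      have hF : pvFront M cols ptr = [] := ((hq ▸ hperm).symm).eq_nil
      have hBest : pvBest M ptr cols = none := by
        have h := pvOMin_front M ptr cols
        rw [hF] at h
        cases hb : pvBest M ptr cols with
        | none => rfl
        | some b => rw [hb] at h; simp [pvOMin] at h
      simp [funcLoopA, funcLoopB, pvHeapPop?, hBest]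
    | cons a rest =>
      subst hq
      have hOM : pvOMin (a :: rest) = (pvBest M ptr cols).map (pvElem M ptr) := by
        rw [pvOMin_perm hperm, pvOMin_front]
      rw [pvOMin_cons] at hOM
      rcases Option.map_eq_some_iff.mp hOM.symm with ⟨b, hbest, hm⟩
      have hbP : b < M.length ∧ ptr.getD b 0 < cols := by
        refine pvBestFold_prop M ptr cols (fun i => i < M.length ∧ ptr.getD i 0 < cols)
          (List.range M.length) none ?_ (by intro b h; cases h) b hbest
        intro i hi hic
        exact ⟨List.mem_range.mp hi, hic⟩
      obtain ⟨hbM, hbc⟩ := hbP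
      obtain ⟨P, S, hsplit, hnotP, hset⟩ := pvFront_split M cols ptr b hbM hbc hlen
      have herase : ((a :: rest).erase (pvElem M ptr b)).Perm (P ++ S) := by
        have h1 := hperm.erase (pvElem M ptr b)
        rw [hsplit, List.erase_append_right _ hnotP, List.erase_cons_head] at h1
        exact h1
      have hpop : pvHeapPop? (a :: rest) =
          some (pvElem M ptr b, (a :: rest).erase (pvElem M ptr b)) := by
        simp only [pvHeapPop?]
        rw [← hm]
      -- unfold one step on each side
      show (match pvHeapPop? (a :: rest) with
        | none => res
        | some ((val, x, y), pq') =>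
          funcLoopA M cols k
            (if y < cols - 1 then pq' ++ [(-(pvGet M x (y + 1)), x, y + 1)] else pq') (res - val)) =
        funcLoopB M cols (k + 1) ptr res
      rw [hpop]
      have hB : funcLoopB M cols (k + 1) ptr res =
          funcLoopB M cols k (ptr.set b (ptr.getD b 0 + 1)) (res + pvGet M b (ptr.getD b 0)) := by
        show (match pvBest M ptr cols with
          | none => res
          | some b =>
            funcLoopB M cols k (ptr.set b (ptr.getD b 0 + 1)) (res + pvGet M b (ptr.getD b 0))) = _
        rw [hbest]
      rw [hB]
      show funcLoopA M cols k
          (if ptr.getD b 0 < cols - 1 then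
            (a :: rest).erase (pvElem M ptr b) ++
              [(-(pvGet M b (ptr.getD b 0 + 1)), (b : Int), ptr.getD b 0 + 1)]
          else (a :: rest).erase (pvElem M ptr b))
          (res - -(pvGet M b (ptr.getD b 0))) = _
      rw [sub_neg_eq_add]
      have hfr := hset (ptr.getD b 0 + 1)
      have hlen' : (ptr.set b (ptr.getD b 0 + 1)).length = M.length := by
        rw [List.length_set]; exact hlen
      by_cases hpush : ptr.getD b 0 + 1 < cols
      · rw [if_pos (by omega : ptr.getD b 0 < cols - 1)]
        rw [if_pos hpush] at hfr
        refine ih _ _ _ hlen' ?_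
        rw [hfr]
        have t2 : (P ++ (S ++ [(-(pvGet M b (ptr.getD b 0 + 1)), (b : Int), ptr.getD b 0 + 1)])).Perm
            (P ++ ([(-(pvGet M b (ptr.getD b 0 + 1)), (b : Int), ptr.getD b 0 + 1)] ++ S)) :=
          List.Perm.append_left P List.perm_append_comm
        have t1 := herase.append_right [(-(pvGet M b (ptr.getD b 0 + 1)), (b : Int), ptr.getD b 0 + 1)]
        rw [List.append_assoc] at t1
        have := t1.trans t2
        simpa [List.append_assoc] using this
      · rw [if_neg (by omega : ¬ ptr.getD b 0 < cols - 1)]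
        rw [if_neg hpush] at hfr
        refine ih _ _ _ hlen' ?_
        rw [hfr]
        simpa using herase

theorem pvFlatMap_singleton {α β : Type} (g : α → β) (l : List α) :
    l.flatMap (fun a => [g a]) = l.map g := by
  induction l with
  | nil => rfl
  | cons a l ih => simp [ih]

theorem pvRangeCast (m : Nat) :
    (do let a ← List.range m; pure ((a : Int))) = (List.range m).map (fun a : Nat => (a : Int)) := by
  rw [show (do let a ← List.range m; pure ((a : Int))) =
      List.flatMap (fun a : Nat => [(a : Int)]) (List.range m) from rfl,
    pvFlatMap_singleton]

theorem pvFront_init (M : List (List Int)) (cols : Int) (m : Nat) (h : 0 < cols) :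
    pvFront M cols (List.replicate m 0) =
      (List.range M.length).map (fun i : Nat => (-(pvGet M i 0), (i : Int), (0 : Int))) := by
  unfold pvFront
  have hrep : ∀ i : Nat, (List.replicate m (0 : Int)).getD i 0 = 0 := by
    intro i
    rw [List.getD_eq_getElem?_getD, List.getElem?_replicate]
    split <;> rfl
  have hfun : (fun i : Nat =>
      if (List.replicate m (0 : Int)).getD i 0 < cols then some (pvElem M (List.replicate m 0) i)
      else none) =
      some ∘ (fun i : Nat => ((-(pvGet M i 0), (i : Int), (0 : Int)))) := by
    funext i
    rw [hrep, if_pos h]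
    unfold pvElem
    rw [hrep]
    rfl
  rw [hfun, List.filterMap_eq_map]

-- ===== VERDICT =====
theorem func_spec : Claim_equal_func := by
  unfold Claim_equal_func Spec_func
  intro matrix n _ hpre
  cases matrix with
  | nil =>
    refine pvLoop_eq _ _ _ _ _ _ ?_ ?_ <;> simp [pvFront]
  | cons r t =>
    have hpre' : 1 ≤ ((r :: t).headD []).length := by
      unfold Pre_func at hpre
      simp only [List.isEmpty_cons, Bool.false_eq_true, if_false] at hpre
      exact hpre.1
    have hcols : 0 < ((((r :: t).headD []).length : Nat) : Int) := by omega
    refine pvLoop_eq _ _ _ _ _ _ ?_ ?_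
    · simp
    · rw [pvFront_init _ _ _ hcols]
      rw [pvRangeCast, List.map_map]
      exact List.Perm.refl _
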